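-- pv_equiv track=rewrite | github.com/superbunny38/2022-3CodingTestPrepTeam | Week1/조이스틱/류채은.py | pivot_backward
-- ===== SOURCE A (Python) =====
-- def pivot_backward(name):
--     pivotting_cost = len(name)
--     for idx,alphabet in enumerate(name[::-1]):
--         cur_idx = (len(name)-1)-idx
--         before_idx = cur_idx-1
--         if before_idx >= 0 and name[before_idx] == 'A':
--             while before_idx >= 0 and name[before_idx] == 'A':
--                 before_idx -= 1
--         dest_idx = before_idx
--         pivotting_cost = min(pivotting_cost, (len(name)-cur_idx)*2+dest_idx)
--     return pivotting_cost
-- ===== SOURCE B (Python) =====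
-- def pivot_backward(name):
--     n = len(name)
--     best = n
--     last = -1  # nearest previous non-'A' index, maintained in one pass
--     for i, c in enumerate(name):
--         best = min(best, (n - i) * 2 + last)
--         if c != 'A':
--             last = i
--     return best
-- ===== Notes on version B (the rewrite author's own statement) =====
-- stated objective: faster
-- what changed: Replaced the per-position backward while-loop that re-scans runs of 'A' with a single forward pass that maintains the nearest previous non-'A' index, so the minimum cost is computed in one loop.
import Mathlib
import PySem

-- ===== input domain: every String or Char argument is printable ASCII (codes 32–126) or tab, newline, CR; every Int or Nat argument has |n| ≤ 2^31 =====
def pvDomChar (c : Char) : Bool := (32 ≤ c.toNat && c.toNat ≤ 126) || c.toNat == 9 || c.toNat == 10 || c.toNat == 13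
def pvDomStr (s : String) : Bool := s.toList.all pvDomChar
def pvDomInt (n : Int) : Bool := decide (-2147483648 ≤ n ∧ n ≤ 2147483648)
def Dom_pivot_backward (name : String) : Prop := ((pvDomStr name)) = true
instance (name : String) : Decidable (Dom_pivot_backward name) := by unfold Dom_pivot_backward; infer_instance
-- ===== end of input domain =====

-- B replaces A's quadratic backward re-scan over 'A'-runs by a single forward pass that
-- maintains the nearest previous non-'A' index (objective: faster, O(n) vs O(n^2)).

-- ===== PORT A =====
-- the inner `while before_idx >= 0 and name[before_idx] == 'A': before_idx -= 1`
def scanA (cs : List Char) (b : Int) : Int :=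
  if h : 0 ≤ b ∧ PySem.List.pyGet? cs b = some 'A' then scanA cs (b - 1) else b
termination_by (b + 1).toNat
decreasing_by omega

def pivot_backward (name : String) : Int :=
  let cs := name.toList
  let n : Int := PySem.List.len cs
  (PySem.List.enumerate cs.reverse).foldl
    (fun pivotting_cost p =>
      let cur_idx := (n - 1) - p.1
      let before_idx := cur_idx - 1
      let before_idx :=
        if 0 ≤ before_idx ∧ PySem.List.pyGet? cs before_idx = some 'A' then
          scanA cs before_idx
        else before_idx
      let dest_idx := before_idx
      min pivotting_cost ((n - cur_idx) * 2 + dest_idx)) n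

-- ===== PORT B =====
def pivot_backward_alt (name : String) : Int :=
  let cs := name.toList
  let n : Int := PySem.List.len cs
  let r := (PySem.List.enumerate cs).foldl
    (fun (st : Int × Int) p =>
      let best := min st.2 ((n - p.1) * 2 + st.1)
      let last := if p.2 ≠ 'A' then p.1 else st.1
      (last, best)) (-1, n)
  r.2

-- ===== PRECONDITION & SPEC =====
def Spec_pivot_backward (name : String) (out : Int) : Prop := out = pivot_backward_alt name
instance (name : String) (out : Int) : Decidable (Spec_pivot_backward name out) := by unfold Spec_pivot_backward; infer_instance

-- ===== CLAIM (what is proved, stated in full; the proofs are below) =====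
def Claim_equal_pivot_backward : Prop := ∀ (name : String), Dom_pivot_backward name → Spec_pivot_backward name (pivot_backward name)

-- ===== LEMMAS AND PROOFS =====

-- nearest previous non-'A' index strictly below i (forward recursion)
def prevA (cs : List Char) : Nat → Int
  | 0 => -1
  | i + 1 => if cs.getD i 'A' ≠ 'A' then (i : Int) else prevA cs i

-- the candidate cost when pivoting at index i
def cand (cs : List Char) (i : Nat) : Int :=
  ((cs.length : Int) - i) * 2 + prevA cs i

theorem scanA_eq_prevA (cs : List Char) (i : Nat) (hi : i ≤ cs.length) :
    scanA cs ((i : Int) - 1) = prevA cs i := by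
  induction i with
  | zero => unfold scanA; simp [prevA]
  | succ i ih =>
    have hlt : i < cs.length := by omega
    unfold scanA
    have hc : ((i + 1 : Nat) : Int) - 1 = ((i : Nat) : Int) := by push_cast; ring
    rw [hc]
    simp only [PySem.List.pyGet?_natCast, List.getElem?_eq_getElem hlt]
    by_cases hA : cs[i] = 'A'
    · rw [dif_pos ⟨by positivity, by simp [hA]⟩, ih (by omega)]
      simp [prevA, List.getD_eq_getElem?_getD, List.getElem?_eq_getElem hlt, hA]
    · rw [dif_neg (by simp [hA])]
      simp [prevA, List.getD_eq_getElem?_getD, List.getElem?_eq_getElem hlt, hA]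

theorem foldl_min_swap (l : List Int) (a x : Int) :
    List.foldl min (min a x) l = min (List.foldl min a l) x := by
  induction l generalizing a with
  | nil => rfl
  | cons y l ih => simpa [List.foldl, min_right_comm a x y] using ih (min a y)

theorem foldl_min_reverse (l : List Int) (a : Int) :
    List.foldl min a l.reverse = List.foldl min a l := by
  induction l generalizing a with
  | nil => rfl
  | cons x l ih => simp [List.foldl, List.foldl_append, ih, foldl_min_swap]

-- a fold whose body only uses the index of each enumerated pair
theorem foldl_enumerate_fst {α β : Type} (xs : List α) (g : β → Int → β) (init : β) :
    (PySem.List.enumerate xs).foldl (fun a p => g a p.1) init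
      = ((PySem.List.enumerate xs).map Prod.fst).foldl g init := by
  rw [List.foldl_map]

-- B's loop invariant: state = (nearest previous non-'A' index, running minimum)
theorem B_invariant (cs : List Char) (n : Int) (m : Nat) :
    List.foldl
      (fun (st : Int × Int) (j : Nat) =>
        (if cs.getD j 'A' ≠ 'A' then (j : Int) else st.1,
         min st.2 ((n - j) * 2 + st.1)))
      (-1, n) (List.range m)
    = (prevA cs m,
       List.foldl min n (((List.range m).map
         (fun i => (n - i) * 2 + prevA cs i)))) := by
  induction m with
  | zero => rfl
  | succ m ih =>
    rw [List.range_succ, List.foldl_append, List.map_append, List.foldl_append, ih]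
    simp [List.foldl, prevA]

theorem B_eq (name : String) :
    pivot_backward_alt name
      = List.foldl min (name.toList.length : Int)
          ((List.range name.toList.length).map (cand name.toList)) := by
  simp only [pivot_backward_alt]
  rw [PySem.List.enumerate_eq_map_pyRange name.toList 'A',
      PySem.List.pyRange_one, List.map_map]
  conv_lhs => rw [List.foldl_map]
  simp only [PySem.List.len_eq, Int.sub_zero, Int.toNat_natCast, Int.zero_add,
    Function.comp, PySem.List.pyGetD_natCast]
  rw [B_invariant name.toList (name.toList.length : Int) name.toList.length]
  show List.foldl min _ (List.map _ _) = _
  congr 1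

theorem A_eq (name : String) :
    pivot_backward name
      = List.foldl min (name.toList.length : Int)
          (((List.range name.toList.length).reverse).map (cand name.toList)) := by
  simp only [pivot_backward]
  set cs := name.toList with hcs
  rw [foldl_enumerate_fst cs.reverse
        (fun cost idx =>
          min cost
            ((PySem.List.len cs - ((PySem.List.len cs - 1) - idx)) * 2 +
              if 0 ≤ ((PySem.List.len cs - 1) - idx) - 1 ∧
                  PySem.List.pyGet? cs (((PySem.List.len cs - 1) - idx) - 1) = some 'A' then
                scanA cs (((PySem.List.len cs - 1) - idx) - 1)
              else ((PySem.List.len cs - 1) - idx) - 1))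
        (PySem.List.len cs)]
  rw [PySem.List.map_fst_enumerate, List.length_reverse, PySem.List.pyRange_one]
  conv_lhs => rw [List.foldl_map]
  -- reindex the right-hand side to run over forward indices
  have hrev : (List.range cs.length).reverse
      = (List.range cs.length).map (fun i => 0 + cs.length - 1 - i) := by
    rw [List.range_eq_range', List.reverse_range']
    simp [List.range_eq_range']
  rw [hrev, List.map_map, List.foldl_map]
  simp only [Int.zero_add, Int.sub_zero, Int.toNat_natCast]
  apply PySem.List.foldl_congr_mem
  intro acc idx hmem
  have hidx : idx < cs.length := List.mem_range.mp hmem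
  simp only [PySem.List.len_eq, Function.comp]
  have hcur : ((cs.length : Int) - 1) - (idx : Int) = ((cs.length - 1 - idx : Nat) : Int) := by
    omega
  have hle : cs.length - 1 - idx ≤ cs.length := by omega
  have hguard : ∀ b : Int,
      (if 0 ≤ b - 1 ∧ PySem.List.pyGet? cs (b - 1) = some 'A' then
        scanA cs (b - 1)
      else b - 1) = scanA cs (b - 1) := by
    intro b
    split
    · rfl
    · conv_rhs => unfold scanA
      rw [dif_neg]; assumption
  have h0 : 0 + cs.length - 1 - idx = cs.length - 1 - idx := by omega
  rw [h0, hguard, hcur, scanA_eq_prevA cs (cs.length - 1 - idx) hle]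
  simp only [cand]

-- ===== VERDICT (by name: the statement is the Claim_ definition above) =====
theorem pivot_backward_spec : Claim_equal_pivot_backward := by
  intro name _
  unfold Spec_pivot_backward
  rw [A_eq, B_eq, List.map_reverse, foldl_min_reverse]
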